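-- pv_equiv track=rewrite | github.com/fusion-flap/flap_apdcam | gui/UdpPacketInspector.py | pseudo_test_pattern_fast
-- ===== SOURCE A (Python) =====
-- def pseudo_test_pattern_fast(adc_bits=14):
--     # we represent each bit by an integer (0/1)
--     # Even though this pseudo-random sequence has a period of 511, we start with 1022
--     # because we want to have an integer number of times the number of ADC bits. ADC bits is 8, 12 or 14
--     # so we will need an even number of bits, for sure
--     bits = 1022
--     bitseq = bytearray(bits)
--     bitseq[0:8] = [1,1,1,1,1,0,1,1]  # first 8 bits
--     for i in range(bits-8):
--         c = (bitseq[4]+bitseq[8])%2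
--         bitseq[1:bits] = bitseq[0:bits-1]  # shift the array forward by 1 index
--         bitseq[0] = c
--
--     # Now replicate the bit-sequence as many times as needed to fit an integer times the number
--     # of ADC bits
--     bitseq1 = bitseq
--     for i in range(14):
--         if len(bitseq)%adc_bits == 0:
--             break
--         bitseq = bitseq + bitseq1
--
--     # the number of generated samples (adc_bits bits transformed into integers)
--     sample_len = len(bitseq)//adc_bits
--     assert sample_len*adc_bits == len(bitseq)
--
--     pseudo_samples = [0]*sample_len
--     for isample in range(sample_len):
--         for bit in range(adc_bits):
--             if bitseq[len(bitseq)-(isample+1)*adc_bits+bit]: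
--                 pseudo_samples[isample] |= 1<<bit;
--
--     return pseudo_samples
-- ===== SOURCE B (Python) =====
-- def pseudo_test_pattern_fast(adc_bits=14):
--     # Generate the LFSR forward (O(n) appends) instead of shifting the whole array each step.
--     P = [0, 1, 1, 0, 1, 1, 1, 1, 1]  # leading 0, then the 8 seed bits reversed
--     for _ in range(1014):
--         P.append((P[-5] + P[-9]) % 2)
--     bitseq = P[1:][::-1]
--
--     # replicate so that adc_bits divides the length (same rule as the original)
--     reps = 1
--     while reps < 15 and (1022 * reps) % adc_bits != 0:
--         reps += 1
--     bitseq = bitseq * reps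
--
--     n = len(bitseq)
--     sample_len = n // adc_bits
--
--     def pack(chunk):
--         v = 0
--         for i, b in enumerate(chunk):
--             if b:
--                 v |= 1 << i
--         return v
--
--     return [pack(bitseq[n - (s + 1) * adc_bits : n - s * adc_bits])
--             for s in range(sample_len)]
-- ===== Notes on version B (the rewrite author's own statement) =====
-- stated objective: faster
-- what changed: B generates the LFSR bit sequence forward by appending one new bit per step to a growing list (reading taps from the end) and then reversing once, instead of A's shifting the whole 1022-cell array on every of the 1014 iterations; B also computes the replication count arithmetically and packs samples by slicing chunks off the end, instead of A's in-place |= writes into a preallocated array.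
-- outside the precondition, e.g. on pseudo_test_pattern_fast(-29): A raises AssertionError, B returns []; on pseudo_test_pattern_fast(0): A raises ZeroDivisionError, B raises ZeroDivisionError
import Mathlib
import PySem

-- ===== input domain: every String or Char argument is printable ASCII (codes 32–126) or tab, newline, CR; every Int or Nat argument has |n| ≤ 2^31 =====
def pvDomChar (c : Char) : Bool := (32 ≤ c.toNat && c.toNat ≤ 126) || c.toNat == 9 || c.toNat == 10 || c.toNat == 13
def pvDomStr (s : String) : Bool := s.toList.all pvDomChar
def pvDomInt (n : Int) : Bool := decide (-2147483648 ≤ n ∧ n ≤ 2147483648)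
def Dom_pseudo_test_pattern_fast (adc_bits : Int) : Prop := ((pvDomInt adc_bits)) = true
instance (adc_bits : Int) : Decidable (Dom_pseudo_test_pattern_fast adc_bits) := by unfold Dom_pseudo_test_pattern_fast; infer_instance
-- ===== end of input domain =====

-- B generates the LFSR sequence forward by appending one bit per step (O(n) appends) instead of
-- shifting the whole 1022-cell array on every iteration, and builds the samples by slicing chunks
-- off the replicated sequence; objective: simpler/faster generation, same return value.

-- ===== PORT A =====
-- A-side helper: the LFSR loop of A ('bits' = 1022; 'for i in range(bits-8)' = 1014 iterations, i unused).
-- Each step: c = (bitseq[4]+bitseq[8]) % 2; bitseq[1:1022] = bitseq[0:1021]; bitseq[0] = c,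
-- i.e. the new state is c :: bitseq[0:1021].
def pvBitsA : List Int :=
  (List.range 1014).foldl
    (fun b _ =>
      let c := PySem.Int.mod (PySem.List.pyGetD b 4 0 + PySem.List.pyGetD b 8 0) 2
      c :: PySem.List.slice b (some 0) (some 1021))
    ([1, 1, 1, 1, 1, 0, 1, 1] ++ List.replicate 1014 0)   -- bytearray(1022) with first 8 bits set

-- A-side helper: 'for i in range(14): if len(bitseq)%adc_bits == 0: break; bitseq = bitseq + bitseq1'
-- as fuel recursion (break = return).
def pvRepA (adc_bits : Int) (bitseq1 : List Int) : Nat → List Int → List Int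
  | 0, bs => bs
  | n + 1, bs =>
    if PySem.Int.mod (PySem.List.len bs) adc_bits = 0 then bs
    else pvRepA adc_bits bitseq1 n (bs ++ bitseq1)

def pseudo_test_pattern_fast (adc_bits : Int) : List Int :=
  let bitseq1 := pvBitsA
  let bitseq := pvRepA adc_bits bitseq1 14 pvBitsA
  let sample_len := PySem.Int.floordiv (PySem.List.len bitseq) adc_bits
  -- pseudo_samples = [0]*sample_len  ([0]*n = [] for n ≤ 0)
  let init : List Int := List.replicate sample_len.toNat 0
  (PySem.List.pyRange 0 sample_len 1).foldl
    (fun ps isample =>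
      (PySem.List.pyRange 0 adc_bits 1).foldl
        (fun ps bit =>
          -- if bitseq[len(bitseq)-(isample+1)*adc_bits+bit]: pseudo_samples[isample] |= 1<<bit
          if PySem.List.pyGetD bitseq
               (PySem.List.len bitseq - (isample + 1) * adc_bits + bit) 0 ≠ 0 then
            PySem.List.pySetD ps isample
              (PySem.Int.bor (PySem.List.pyGetD ps isample 0) ((1 : Int) <<< bit.toNat))
          else ps)
        ps)
    init

-- ===== PORT B =====
-- B-side helper: forward LFSR generation; P starts as [0] ++ reversed seed, then 1014 appends of
-- (P[-5] + P[-9]) % 2; bitseq = P[1:][::-1]  ([::-1] is reverse, cf. PySem.List.slice?_none_none_neg_one).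
def pvBitsB : List Int :=
  let P := (List.range 1014).foldl
    (fun P _ =>
      P ++ [PySem.Int.mod (PySem.List.pyGetD P (-5) 0 + PySem.List.pyGetD P (-9) 0) 2])
    [0, 1, 1, 0, 1, 1, 1, 1, 1]
  (PySem.List.slice P (some 1) none).reverse

-- B-side helper: 'reps = 1; while reps < 15 and (1022*reps) % adc_bits != 0: reps += 1'
-- (fuel 14 suffices: reps increases by 1 each pass and the guard stops it at 15).
def pvAltReps (adc_bits : Int) : Nat → Int → Int
  | 0, r => r
  | n + 1, r =>
    if r < 15 ∧ PySem.Int.mod (1022 * r) adc_bits ≠ 0 then pvAltReps adc_bits n (r + 1)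
    else r

-- B-side helper: pack(chunk): v = 0; for i, b in enumerate(chunk): if b: v |= 1 << i
def pvPack (chunk : List Int) : Int :=
  (PySem.List.enumerate chunk).foldl
    (fun v (ib : Int × Int) => if ib.2 ≠ 0 then PySem.Int.bor v ((1 : Int) <<< ib.1.toNat) else v) 0

def pseudo_test_pattern_fast_alt (adc_bits : Int) : List Int :=
  let bitseq0 := pvBitsB
  let reps := pvAltReps adc_bits 14 1
  let bitseq := (List.replicate reps.toNat bitseq0).flatten   -- bitseq0 * reps (reps ≥ 1)
  let n := PySem.List.len bitseq
  let sample_len := PySem.Int.floordiv n adc_bits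
  (PySem.List.pyRange 0 sample_len 1).map
    (fun s => pvPack (PySem.List.slice bitseq
        (some (n - (s + 1) * adc_bits)) (some (n - s * adc_bits))))

-- ===== PRECONDITION & SPEC =====
-- Pre_ excludes adc_bits = 0 (A raises ZeroDivisionError) and every adc_bits that divides none of
-- 1022*1 … 1022*15 (A's assert fails: AssertionError). On every other input A returns normally.
def Pre_pseudo_test_pattern_fast (adc_bits : Int) : Prop :=
  adc_bits ≠ 0 ∧ ∃ k : Fin 15, adc_bits ∣ (1022 * ((k : Int) + 1))
instance (adc_bits : Int) : Decidable (Pre_pseudo_test_pattern_fast adc_bits) := by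
  unfold Pre_pseudo_test_pattern_fast; infer_instance

def pvWitness_pseudo_test_pattern_fast : Int := 14

def Spec_pseudo_test_pattern_fast (adc_bits : Int) (out : List Int) : Prop := out = pseudo_test_pattern_fast_alt adc_bits
instance (adc_bits : Int) (out : List Int) : Decidable (Spec_pseudo_test_pattern_fast adc_bits out) := by unfold Spec_pseudo_test_pattern_fast; infer_instance

-- ===== CLAIM (what is proved, stated in full; the proofs are below) =====
def Claim_equal_pseudo_test_pattern_fast : Prop := ∀ (adc_bits : Int), Dom_pseudo_test_pattern_fast adc_bits → Pre_pseudo_test_pattern_fast adc_bits → Spec_pseudo_test_pattern_fast adc_bits (pseudo_test_pattern_fast adc_bits)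


-- ===== LEMMAS AND PROOFS =====
set_option maxRecDepth 40000


theorem pvBits_inv : ∀ t : Nat, 1 ≤ t → t ≤ 1014 → ∃ cs : List Int,
    cs.length = t ∧
    (List.range t).foldl
      (fun P _ =>
        P ++ [PySem.Int.mod (PySem.List.pyGetD P (-5) 0 + PySem.List.pyGetD P (-9) 0) 2])
      [0, 1, 1, 0, 1, 1, 1, 1, 1]
      = 0 :: (cs.reverse ++ [1, 1, 1, 1, 1, 0, 1, 1]).reverse ∧
    (List.range t).foldl
      (fun b _ =>
        let c := PySem.Int.mod (PySem.List.pyGetD b 4 0 + PySem.List.pyGetD b 8 0) 2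
        c :: PySem.List.slice b (some 0) (some 1021))
      ([1, 1, 1, 1, 1, 0, 1, 1] ++ List.replicate 1014 0)
      = (cs.reverse ++ [1, 1, 1, 1, 1, 0, 1, 1]) ++ List.replicate (1014 - t) 0 := by
  intro t h1
  induction t, h1 using Nat.le_induction with
  | base => intro _; exact ⟨[1], by decide, by decide, by decide⟩
  | succ t h1 ih =>
    intro ht
    obtain ⟨cs, hlen, hB, hA⟩ := ih (by omega)
    set Q : List Int := cs.reverse ++ [1, 1, 1, 1, 1, 0, 1, 1] with hQ
    have hQlen : Q.length = t + 8 := by simp [hQ, hlen]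
    have h4 : 4 < Q.length := by omega
    have h8 : 8 < Q.length := by omega
    have e5 : PySem.List.pyGetD (0 :: Q.reverse) (-5) (0:Int) = Q[4]'h4 := by
      rw [PySem.List.pyGetD_neg_ofNat _ 5 0 (by omega) (by simp [hQlen])]
      simp only [List.length_cons, List.length_reverse, hQlen]
      simp only [show t + 8 + 1 - 5 = (t + 3) + 1 from by omega]
      rw [List.getElem_cons_succ, List.getElem_reverse]
      congr 1
      omega
    have e9 : PySem.List.pyGetD (0 :: Q.reverse) (-9) (0:Int) = Q[8]'h8 := by
      rw [PySem.List.pyGetD_neg_ofNat _ 9 0 (by omega) (by simp [hQlen])]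
      simp only [List.length_cons, List.length_reverse, hQlen]
      simp only [show t + 8 + 1 - 9 = (t - 1) + 1 from by omega]
      rw [List.getElem_cons_succ, List.getElem_reverse]
      congr 1
      omega
    have eA4 : PySem.List.pyGetD (Q ++ List.replicate (1014 - t) (0:Int)) 4 0 = Q[4]'h4 := by
      rw [PySem.List.pyGetD_ofNat' _ 4 0, List.getD_eq_getElem _ _ (by simp [hQlen]; omega),
        List.getElem_append_left h4]
    have eA8 : PySem.List.pyGetD (Q ++ List.replicate (1014 - t) (0:Int)) 8 0 = Q[8]'h8 := by
      rw [PySem.List.pyGetD_ofNat' _ 8 0, List.getD_eq_getElem _ _ (by simp [hQlen]; omega),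
        List.getElem_append_left h8]
    set c := PySem.Int.mod (Q[4]'h4 + Q[8]'h8) 2 with hc
    have hrev : ((cs ++ [c]).reverse ++ [1, 1, 1, 1, 1, 0, 1, 1] : List Int) = c :: Q := by
      simp [hQ]
    refine ⟨cs ++ [c], by simp [hlen], ?_, ?_⟩
    · rw [List.range_succ, List.foldl_append, hB, List.foldl_cons, List.foldl_nil, hrev]
      rw [e5, e9, ← hc]
      simp
    · rw [List.range_succ, List.foldl_append, hA, List.foldl_cons, List.foldl_nil, hrev]
      have hsl : PySem.List.slice (Q ++ List.replicate (1014 - t) (0:Int)) (some 0) (some 1021)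
          = Q ++ List.replicate (1014 - (t+1)) (0:Int) := by
        rw [PySem.List.slice_zero_start, PySem.List.slice_to _ (show (0:Int) ≤ 1021 by norm_num)]
        rw [show ((1021:Int).toNat) = 1021 from rfl, List.take_append]
        rw [List.take_of_length_le (show Q.length ≤ 1021 by omega), List.take_replicate]
        rw [show min (1021 - Q.length) (1014 - t) = 1014 - (t+1) from by omega]
      rw [eA4, eA8, hsl, ← hc]
      simp [List.append_assoc]





theorem bits_eq : pvBitsA = pvBitsB := by
  obtain ⟨cs, hlen, hB, hA⟩ := pvBits_inv 1014 (by omega) (le_refl _)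
  unfold pvBitsA pvBitsB
  rw [hA, hB]
  simp only [PySem.List.slice_from_one, List.tail_cons, List.reverse_reverse,
    List.append_nil, Nat.sub_self, List.replicate_zero]

theorem bitsA_len : pvBitsA.length = 1022 := by
  obtain ⟨cs, hlen, hB, hA⟩ := pvBits_inv 1014 (by omega) (le_refl _)
  unfold pvBitsA
  rw [hA]
  simp only [List.length_append, List.length_reverse, List.length_replicate, hlen]
  rfl

theorem flatten_len (r : Nat) : ((List.replicate r pvBitsA).flatten).length = r * 1022 := by
  induction r with
  | zero => simp
  | succ r ih =>
    rw [List.replicate_succ, List.flatten_cons, List.length_append, ih, bitsA_len]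
    ring

theorem rep_eq (adc : Int) : ∀ (n : Nat) (r : Nat), 1 ≤ r → r + n = 15 →
    pvRepA adc pvBitsA n ((List.replicate r pvBitsA).flatten)
      = (List.replicate (pvAltReps adc n (r : Int)).toNat pvBitsA).flatten := by
  intro n
  induction n with
  | zero => intro r h1 h15; simp [pvRepA, pvAltReps]
  | succ n ihn =>
    intro r h1 h15
    have hlenflat : PySem.List.len ((List.replicate r pvBitsA).flatten) = 1022 * (r : Int) := by
      simp only [PySem.List.len_eq, flatten_len]; push_cast; ring
    have hr15 : ((r : Int) < 15) := by exact_mod_cast (by omega : r < 15)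
    by_cases hd : PySem.Int.mod (1022 * (r : Int)) adc = 0
    · rw [pvRepA, pvAltReps, hlenflat, if_pos hd, if_neg (by simp [hd]), Int.toNat_natCast]
    · rw [pvRepA, pvAltReps, hlenflat, if_neg hd, if_pos ⟨hr15, hd⟩]
      have : (List.replicate r pvBitsA).flatten ++ pvBitsA
          = (List.replicate (r + 1) pvBitsA).flatten := by
        rw [List.replicate_succ', List.flatten_append]; simp
      rw [this, ihn (r + 1) (by omega) (by omega)]
      norm_num


theorem reps_ge_one (adc : Int) : ∀ (n : Nat) (r : Int), 1 ≤ r → 1 ≤ pvAltReps adc n r := by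
  intro n
  induction n with
  | zero => intro r h; simpa [pvAltReps] using h
  | succ n ih =>
    intro r h
    rw [pvAltReps]
    split
    · exact ih (r + 1) (by omega)
    · exact h

theorem reps_dvd (adc : Int) : ∀ (n : Nat) (r : Int), r + n = 15 →
    (∃ j : Int, r ≤ j ∧ j ≤ 15 ∧ adc ∣ 1022 * j) → adc ∣ 1022 * pvAltReps adc n r := by
  intro n
  induction n with
  | zero =>
    intro r h15 ⟨j, hj1, hj2, hj3⟩
    rw [pvAltReps]
    have : j = r := by omega
    rwa [this] at hj3
  | succ n ih =>
    intro r h15 ⟨j, hj1, hj2, hj3⟩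
    rw [pvAltReps]
    split
    · rename_i hcond
      refine ih (r + 1) (by omega) ⟨j, ?_, hj2, hj3⟩
      rcases eq_or_lt_of_le hj1 with heq | hlt
      · exfalso
        exact hcond.2 ((PySem.Int.mod_eq_zero_iff_dvd _ _).mpr (heq ▸ hj3))
      · omega
    · rename_i hcond
      rcases Decidable.em (r < 15) with h15' | h15'
      · have : PySem.Int.mod (1022 * r) adc = 0 := by
          by_contra hne
          exact hcond ⟨h15', hne⟩
        exact (PySem.Int.mod_eq_zero_iff_dvd _ _).mp this
      · have : j = r := by omega
        rwa [this] at hj3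

theorem setFold (p : Int → Prop) [DecidablePred p] (f : Int → Int → Int) :
    ∀ (bl : List Int) (ps : List Int) (j : Nat), j < ps.length →
    bl.foldl (fun ps bit => if p bit then ps.set j (f (ps.getD j 0) bit) else ps) ps
      = ps.set j (bl.foldl (fun v bit => if p bit then f v bit else v) (ps.getD j 0)) := by
  intro bl
  induction bl with
  | nil =>
    intro ps j hj
    simp only [List.foldl_nil]
    rw [List.getD_eq_getElem _ _ hj, List.set_getElem_self]
  | cons b bl ih =>
    intro ps j hj
    by_cases hp : p b
    · simp only [List.foldl_cons, if_pos hp]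
      rw [ih _ j (by simpa using hj)]
      rw [List.set_set]
      congr 1
      congr 1
      rw [List.getD_eq_getElem _ _ (by simpa using hj)]
      rw [List.getElem_set_self (by simpa using hj)]
    · simp only [List.foldl_cons, if_neg hp]
      exact ih ps j hj

theorem outerFold (m : Nat) (G : Nat → Int → Int) (step : List Int → Nat → List Int)
    (hstep : ∀ ps j, j < ps.length → step ps j = ps.set j (G j (ps.getD j 0))) :
    ∀ k, k ≤ m → (List.range k).foldl step (List.replicate m (0:Int))
      = (List.range k).map (fun j => G j 0) ++ List.replicate (m - k) 0 := by
  intro k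
  induction k with
  | zero => simp
  | succ k ih =>
    intro hk
    rw [List.range_succ, List.foldl_append, ih (by omega), List.foldl_cons, List.foldl_nil]
    have hlen : ((List.range k).map (fun j => G j 0) ++ List.replicate (m - k) (0:Int)).length = m := by
      simp; omega
    rw [hstep _ k (by omega)]
    have hmk : List.replicate (m - k) (0:Int) = 0 :: List.replicate (m - (k+1)) 0 := by
      rw [← List.replicate_succ]
      congr 1
      omega
    rw [hmk]
    have hplen : ((List.range k).map (fun j => G j 0)).length = k := by simp
    have hget : ((List.range k).map (fun j => G j 0) ++ 0 :: List.replicate (m - (k+1)) (0:Int)).getD k 0 = 0 := by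
      rw [List.getD]
      rw [show k = ((List.range k).map (fun j => G j 0)).length from hplen.symm]
      simp [List.getElem?_append_right]
    rw [hget]
    rw [List.set_append, if_neg (by rw [hplen]; omega)]
    rw [hplen, Nat.sub_self, List.set_cons_zero]
    simp [List.range_succ]

theorem pack_eq (L : List Int) (adc : Int) (hadc : 0 < adc) (a b : Int)
    (ha : 0 ≤ a) (hb : b ≤ (L.length : Int)) (hab : a + adc = b) :
    pvPack (PySem.List.slice L (some a) (some b))
      = (PySem.List.pyRange 0 adc 1).foldl
          (fun v bit => if PySem.List.pyGetD L (a + bit) 0 ≠ 0 then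
              PySem.Int.bor v ((1 : Int) <<< bit.toNat) else v) 0 := by
  have hb0 : 0 ≤ b := by omega
  have haL : a ≤ (L.length : Int) := by omega
  have hchunk : PySem.List.slice L (some a) (some b) = (L.drop a.toNat).take (b.toNat - a.toNat) :=
    PySem.List.slice_of_nonneg L ha hb0 haL hb
  have hclen : (PySem.List.slice L (some a) (some b)).length = adc.toNat := by
    rw [hchunk]
    simp only [List.length_take, List.length_drop]
    omega
  rw [pvPack]
  rw [PySem.List.enumerate_eq_map_pyRange _ (0 : Int)]
  rw [List.foldl_map]
  rw [PySem.List.len_eq, hclen]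
  rw [show ((adc.toNat : Int)) = adc from by omega]
  apply PySem.List.foldl_congr_mem
  intro acc bit hbit
  rw [PySem.List.mem_pyRange_one] at hbit
  have hgc : PySem.List.pyGetD (PySem.List.slice L (some a) (some b)) bit 0
      = PySem.List.pyGetD L (a + bit) 0 := by
    rw [PySem.List.pyGetD_eq_getElem _ 0 hbit.1 (by rw [hclen]; omega)]
    rw [PySem.List.pyGetD_eq_getElem _ 0 (by omega) (by omega)]
    simp only [hchunk, List.getElem_take, List.getElem_drop]
    congr 1
    omega
  rw [hgc]


theorem main_eq (adc : Int) (hpre : Pre_pseudo_test_pattern_fast adc) :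
    pseudo_test_pattern_fast adc = pseudo_test_pattern_fast_alt adc := by
  obtain ⟨hne, k, hk⟩ := hpre
  simp only [pseudo_test_pattern_fast, pseudo_test_pattern_fast_alt]
  rw [← bits_eq]
  set reps := pvAltReps adc 14 1 with hreps
  have hreps1 : 1 ≤ reps := reps_ge_one adc 14 1 le_rfl
  set L := (List.replicate reps.toNat pvBitsA).flatten with hL
  have hLlen : L.length = reps.toNat * 1022 := flatten_len _
  have hdvd : adc ∣ 1022 * reps := by
    refine reps_dvd adc 14 1 (by omega) ⟨(k : Int) + 1, by omega, ?_, hk⟩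
    have := k.isLt
    omega
  have hnnL : ((L.length : Int)) = 1022 * reps := by
    rw [hLlen]
    push_cast [Int.toNat_of_nonneg (by omega : (0:Int) ≤ reps)]
    ring
  have hdvd' : adc ∣ (L.length : Int) := by rw [hnnL]; exact hdvd
  have hA : pvRepA adc pvBitsA 14 pvBitsA = L := by
    have h1 : (List.replicate 1 pvBitsA).flatten = pvBitsA := by simp
    have h2 := rep_eq adc 14 1 le_rfl rfl
    rw [h1] at h2
    rw [h2, hL, hreps, Nat.cast_one]
  rw [hA]
  simp only [PySem.List.len_eq]
  set nn : Int := (L.length : Int) with hnn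
  set q := PySem.Int.floordiv nn adc with hq
  have hmod : PySem.Int.mod nn adc = 0 := (PySem.Int.mod_eq_zero_iff_dvd _ _).mpr hdvd'
  have hfm := PySem.Int.floordiv_mul_add_mod nn adc
  rw [hmod, add_zero, ← hq] at hfm
  have hnpos : (0:Int) < nn := by nlinarith [hnnL, hreps1]
  rcases lt_trichotomy adc 0 with hneg | hzero | hpos
  · have hq0 : q < 0 := by nlinarith
    rw [show PySem.List.pyRange 0 q 1 = [] from PySem.List.pyRange_one_eq_nil (by omega)]
    simp only [List.foldl_nil, List.map_nil]
    rw [Int.toNat_of_nonpos (by omega : q ≤ 0), List.replicate_zero]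
  · exact absurd hzero hne
  · have hq0 : 0 ≤ q := by nlinarith
    set m := q.toNat with hm
    have hqm : q = (m : Int) := by omega
    rw [hqm, PySem.List.pyRange_zero_nat m, List.foldl_map, List.map_map]
    simp only [PySem.List.pySetD_natCast, PySem.List.pyGetD_natCast, Int.toNat_natCast]
    rw [outerFold m
      (fun j v => (PySem.List.pyRange 0 adc 1).foldl
        (fun v bit => if PySem.List.pyGetD L (nn - ((j:Int) + 1) * adc + bit) 0 ≠ 0 then
            PySem.Int.bor v ((1 : Int) <<< bit.toNat) else v) v)
      _ (fun ps j hj => setFold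
          (fun bit => PySem.List.pyGetD L (nn - ((j:Int) + 1) * adc + bit) 0 ≠ 0)
          (fun v bit => PySem.Int.bor v ((1 : Int) <<< bit.toNat))
          (PySem.List.pyRange 0 adc 1) ps j hj)
      m le_rfl]
    simp only [Nat.sub_self, List.replicate_zero, List.append_nil, Function.comp]
    apply List.map_congr_left
    intro j hj
    rw [List.mem_range] at hj
    have hjm : ((j:Int) + 1) ≤ (m : Int) := by exact_mod_cast hj
    have hqnn : (m : Int) * adc = nn := by rw [← hqm]; exact hfm
    have hjq : ((j:Int) + 1) * adc ≤ nn := by nlinarith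
    have hj0 : 0 ≤ (j:Int) * adc := by positivity
    have := pack_eq L adc hpos (nn - ((j:Int) + 1) * adc) (nn - (j:Int) * adc)
      (by nlinarith) (by simpa [hnn] using by linarith : nn - (j:Int) * adc ≤ (L.length : Int)) (by ring)
    rw [← this, ← hnn]
    rfl

-- ===== VERDICT (by name: the statement is the Claim_ definition above) =====
theorem pseudo_test_pattern_fast_spec : Claim_equal_pseudo_test_pattern_fast := by
  intro adc _ hpre
  unfold Spec_pseudo_test_pattern_fast
  exact main_eq adc hpre
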